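-- pv_equiv track=rewrite | github.com/eBLDR/Mathematics | special_numbers.py | is_antiprime
-- ===== SOURCE A (Python) =====
-- def proper_divisors(number: int) -> list:
--     """Returns a list with the proper divisors of a given number."""
--     proper_div = []
--     for i in range(1, number):  # finding the proper divisors
--         if number % i == 0:
--             proper_div.append(i)
--
--     return proper_div
--
-- def is_antiprime(number: int) -> bool:
--     """ (aka Highly Composite) It's a positive integer with more divisors than any smaller integer. """
--     prop_div = proper_divisors(number)
--     prop_div.append(number)
--
--     for i in range(1, number):
--         i_prop_div = proper_divisors(i)
--         i_prop_div.append(i)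
--         if len(i_prop_div) >= len(prop_div):
--             return False
--     else:
--         return True
-- ===== SOURCE B (Python) =====
-- def _divcount(m):
--     """Number of divisors of m (0 for m < 1), by trial division up to sqrt(m)."""
--     count = 0
--     j = 1
--     while j * j <= m:
--         if m % j == 0:
--             count += 1 if j * j == m else 2
--         j += 1
--     return count
--
-- def is_antiprime(number):
--     """ (aka Highly Composite) It's a positive integer with more divisors than any smaller integer. """
--     dn = _divcount(number)
--     return all(_divcount(i) < dn for i in range(1, number))
-- ===== Notes on version B (the rewrite author's own statement) =====
-- stated objective: faster
-- what changed: Instead of materializing the full proper-divisor list of n and of every i < n by trial division over all smaller numbers, B counts divisors of each candidate with paired trial division up to the square root (each divisor j <= sqrt pairs with m/j) and compares counts.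
import Mathlib
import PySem

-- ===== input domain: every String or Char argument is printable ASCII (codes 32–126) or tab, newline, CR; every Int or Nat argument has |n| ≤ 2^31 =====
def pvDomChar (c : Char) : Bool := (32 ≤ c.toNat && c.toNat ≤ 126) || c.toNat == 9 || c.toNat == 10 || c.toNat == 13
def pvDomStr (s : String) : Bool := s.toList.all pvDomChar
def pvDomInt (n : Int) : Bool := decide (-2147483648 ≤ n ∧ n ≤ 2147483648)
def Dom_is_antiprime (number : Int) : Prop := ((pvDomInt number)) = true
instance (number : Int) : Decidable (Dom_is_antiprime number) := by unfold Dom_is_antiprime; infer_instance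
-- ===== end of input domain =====

-- B replaces A's per-candidate scan of all smaller numbers (divisor lists) by a paired
-- trial division up to the square root, counting divisors instead of listing them.

-- ===== PORT A =====
def proper_divisors (number : Int) : List Int :=
  (PySem.List.pyRange 1 number 1).foldl
    (fun acc i => if PySem.Int.mod number i == 0 then acc ++ [i] else acc) []

-- the 'for i in range(1, number)' loop of A with its early 'return False'
def is_antiprime_loop (plen : Nat) : List Int → Bool
  | [] => true
  | i :: rest =>
    if (proper_divisors i ++ [i]).length ≥ plen then false
    else is_antiprime_loop plen rest

def is_antiprime (number : Int) : Bool :=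
  let prop_div := proper_divisors number ++ [number]
  is_antiprime_loop prop_div.length (PySem.List.pyRange 1 number 1)

-- ===== PORT B =====
-- the 'while j * j <= m' loop of B's _divcount
def divcountGo (m j count : Int) : Int :=
  if h : j * j ≤ m then
    divcountGo m (j + 1)
      (if PySem.Int.mod m j == 0 then (if j * j == m then count + 1 else count + 2) else count)
  else count
termination_by (m + 1 - j).toNat
decreasing_by
  have hjj : j ≤ j * j := by
    by_cases h0 : j ≤ 0
    · exact le_trans h0 (mul_self_nonneg j)
    · exact le_mul_of_one_le_left (by omega) (by omega)
  omega

def divcount (m : Int) : Int := divcountGo m 1 0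

def is_antiprime_alt (number : Int) : Bool :=
  let dn := divcount number
  (PySem.List.pyRange 1 number 1).all (fun i => divcount i < dn)

-- ===== PRECONDITION & SPEC =====
def Spec_is_antiprime (number : Int) (out : Bool) : Prop := out = is_antiprime_alt number
instance (number : Int) (out : Bool) : Decidable (Spec_is_antiprime number out) := by unfold Spec_is_antiprime; infer_instance

-- ===== CLAIM (what is proved, stated in full; the proofs are below) =====
def Claim_equal_is_antiprime : Prop := ∀ (number : Int), Dom_is_antiprime number → Spec_is_antiprime number (is_antiprime number)

-- ===== LEMMAS AND PROOFS =====

-- the set of positive divisors of m (proof-only; not used by either port)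
noncomputable def pvDiv (m : Int) : Finset Int := (Finset.Icc 1 m).filter (fun d => d ∣ m)

theorem all_congr_mem {α : Type} (l : List α) (p q : α → Bool) (h : ∀ x ∈ l, p x = q x) :
    l.all p = l.all q := by
  induction l with
  | nil => rfl
  | cons a t ih =>
    simp only [List.all_cons, h a (by simp), ih (fun x hx => h x (by simp [hx]))]

-- A's proper_divisors is a filter of the range
theorem proper_divisors_eq (m : Int) :
    proper_divisors m = (PySem.List.pyRange 1 m 1).filter (fun i => PySem.Int.mod m i == 0) := by
  simpa [proper_divisors] using
    PySem.List.foldl_append_if_eq_filter (fun i => PySem.Int.mod m i == 0)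
      (PySem.List.pyRange 1 m 1) []

theorem A_count (m : Int) (hm : 1 ≤ m) :
    (proper_divisors m ++ [m]).length = (pvDiv m).card := by
  rw [proper_divisors_eq]
  have hnd : ((PySem.List.pyRange 1 m 1).filter (fun i => PySem.Int.mod m i == 0)).Nodup :=
    (PySem.List.nodup_pyRange_one 1 m).filter _
  have hset : ((PySem.List.pyRange 1 m 1).filter (fun i => PySem.Int.mod m i == 0)).toFinset
      = (Finset.Icc 1 (m - 1)).filter (fun d => d ∣ m) := by
    ext x
    simp only [List.mem_toFinset, List.mem_filter, PySem.List.mem_pyRange_one,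
      Finset.mem_filter, Finset.mem_Icc, beq_iff_eq]
    constructor
    · rintro ⟨⟨h1, h2⟩, h3⟩
      exact ⟨⟨h1, by omega⟩, (PySem.Int.mod_eq_zero_iff_dvd m x).mp h3⟩
    · rintro ⟨⟨h1, h2⟩, h3⟩
      exact ⟨⟨h1, by omega⟩, (PySem.Int.mod_eq_zero_iff_dvd m x).mpr h3⟩
  have hins : pvDiv m = insert m ((Finset.Icc 1 (m - 1)).filter (fun d => d ∣ m)) := by
    ext x
    simp only [pvDiv, Finset.mem_filter, Finset.mem_Icc, Finset.mem_insert]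
    constructor
    · rintro ⟨⟨h1, h2⟩, h3⟩
      rcases eq_or_lt_of_le h2 with h | h
      · exact Or.inl h
      · exact Or.inr ⟨⟨h1, by omega⟩, h3⟩
    · rintro (rfl | ⟨⟨h1, h2⟩, h3⟩)
      · exact ⟨⟨by assumption, le_refl _⟩, dvd_refl _⟩
      · exact ⟨⟨h1, by omega⟩, h3⟩
  rw [hins, Finset.card_insert_of_notMem (by simp only [Finset.mem_filter, Finset.mem_Icc]; omega),
    ← hset, List.toFinset_card_of_nodup hnd]
  simp

-- B's while loop computes a weighted sum over the divisors ≤ sqrt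
theorem divcountGo_spec_aux (m : Int) (n : Nat) :
    ∀ (j c : Int), (m + 1 - j).toNat = n → 1 ≤ j →
      divcountGo m j c =
        c + ((Finset.Icc j m).filter (fun k => k ∣ m ∧ k * k ≤ m)).sum
              (fun k => if k * k = m then (1 : Int) else 2) := by
  induction n using Nat.strong_induction_on with
  | _ n ih =>
    intro j c hn hj
    by_cases h : j * j ≤ m
    · have hjm : j ≤ m := by nlinarith
      rw [divcountGo, dif_pos h,
        ih (m + 1 - (j + 1)).toNat (by omega) (j + 1) _ rfl (by omega)]
      have hins : Finset.Icc j m = insert j (Finset.Icc (j + 1) m) := by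
        ext x; simp only [Finset.mem_Icc, Finset.mem_insert]; omega
      rw [hins, Finset.filter_insert]
      by_cases hd : j ∣ m
      · rw [if_pos (⟨hd, h⟩ : j ∣ m ∧ j * j ≤ m),
          Finset.sum_insert (by simp only [Finset.mem_filter, Finset.mem_Icc]; omega)]
        have hmod : (PySem.Int.mod m j == 0) = true := by
          simp only [beq_iff_eq]
          exact (PySem.Int.mod_eq_zero_iff_dvd m j).mpr hd
        by_cases hsq : j * j = m
        · simp only [hmod, hsq, beq_self_eq_true, if_true]
          try simp
          try ring
        · have hb : (j * j == m) = false := by simp [hsq]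
          simp only [hmod, hb, if_neg hsq, Bool.false_eq_true, if_false]
          try simp
          try ring
      · have hmod : (PySem.Int.mod m j == 0) = false := by
          simp only [beq_eq_false_iff_ne, ne_eq]
          intro hc; exact hd ((PySem.Int.mod_eq_zero_iff_dvd m j).mp hc)
        rw [if_neg (fun hc : j ∣ m ∧ j * j ≤ m => hd hc.1)]
        simp [hmod]
    · rw [divcountGo, dif_neg h]
      have hempty : ((Finset.Icc j m).filter (fun k => k ∣ m ∧ k * k ≤ m)) = ∅ := by
        apply Finset.filter_false_of_mem
        intro k hk
        simp only [Finset.mem_Icc] at hk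
        rintro ⟨-, hsq⟩
        have : j * j ≤ k * k := by nlinarith [hk.1]
        omega
      rw [hempty]
      simp

theorem divcountGo_spec (m j c : Int) (hj : 1 ≤ j) :
    divcountGo m j c =
      c + ((Finset.Icc j m).filter (fun k => k ∣ m ∧ k * k ≤ m)).sum
            (fun k => if k * k = m then (1 : Int) else 2) :=
  divcountGo_spec_aux m (m + 1 - j).toNat j c rfl hj

-- the positivity/inverse facts of the sqrt pairing k ↦ m / k on divisors
theorem pvPair (m k : Int) (hm : 1 ≤ m) (hk1 : 1 ≤ k) (hd : k ∣ m) :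
    1 ≤ m / k ∧ m / k ≤ m ∧ (m / k) ∣ m ∧ k * (m / k) = m ∧ m / (m / k) = k := by
  have hke : k * (m / k) = m := Int.mul_ediv_cancel' hd
  have he1 : 1 ≤ m / k := by nlinarith
  refine ⟨he1, by nlinarith, ⟨k, by rw [mul_comm]; exact hke.symm⟩, hke, ?_⟩
  exact Int.ediv_eq_of_eq_mul_left (by omega) (by linarith [hke])

-- divisors k with m < k*k biject with divisors k with k*k < m via k ↦ m / k
theorem pvLargeSmall (m : Int) (hm : 1 ≤ m) :
    ((pvDiv m).filter (fun k => m < k * k)).card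
      = ((pvDiv m).filter (fun k => k * k < m)).card := by
  apply Finset.card_bij' (fun k _ => m / k) (fun k _ => m / k)
  · intro k hk
    simp only [pvDiv, Finset.mem_filter, Finset.mem_Icc] at hk ⊢
    obtain ⟨⟨⟨hk1, hkm⟩, hd⟩, hgt⟩ := hk
    obtain ⟨he1, hem, hed, hke, -⟩ := pvPair m k hm hk1 hd
    have hlt : m / k < k := by nlinarith
    exact ⟨⟨⟨he1, hem⟩, hed⟩, by nlinarith⟩
  · intro k hk
    simp only [pvDiv, Finset.mem_filter, Finset.mem_Icc] at hk ⊢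
    obtain ⟨⟨⟨hk1, hkm⟩, hd⟩, hlt⟩ := hk
    obtain ⟨he1, hem, hed, hke, -⟩ := pvPair m k hm hk1 hd
    have hgt : k < m / k := by nlinarith
    exact ⟨⟨⟨he1, hem⟩, hed⟩, by nlinarith⟩
  · intro k hk
    simp only [pvDiv, Finset.mem_filter, Finset.mem_Icc] at hk
    exact (pvPair m k hm hk.1.1.1 hk.1.2).2.2.2.2
  · intro k hk
    simp only [pvDiv, Finset.mem_filter, Finset.mem_Icc] at hk
    exact (pvPair m k hm hk.1.1.1 hk.1.2).2.2.2.2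

-- the sqrt pairing: the weighted count of divisors up to sqrt is the divisor count
theorem pairing (m : Int) (hm : 1 ≤ m) :
    ((Finset.Icc 1 m).filter (fun k => k ∣ m ∧ k * k ≤ m)).sum
        (fun k => if k * k = m then (1 : Int) else 2) = (pvDiv m).card := by
  have hD : (Finset.Icc 1 m).filter (fun k => k ∣ m ∧ k * k ≤ m)
      = (pvDiv m).filter (fun k => k * k ≤ m) := by
    rw [pvDiv, Finset.filter_filter]
  have hsplit : (pvDiv m).filter (fun k => k * k ≤ m)
      = ((pvDiv m).filter (fun k => k * k = m)) ∪ ((pvDiv m).filter (fun k => k * k < m)) := by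
    rw [← Finset.filter_or]
    exact Finset.filter_congr (fun k _ => by constructor <;> intro h <;> omega)
  have hdisj : Disjoint ((pvDiv m).filter (fun k => k * k = m))
      ((pvDiv m).filter (fun k => k * k < m)) := by
    rw [Finset.disjoint_left]
    intro a ha hb
    simp only [Finset.mem_filter] at ha hb
    omega
  have hEsum : ((pvDiv m).filter (fun k => k * k = m)).sum
      (fun k => if k * k = m then (1 : Int) else 2)
      = (((pvDiv m).filter (fun k => k * k = m)).card : Int) := by
    rw [Finset.sum_congr rfl (fun k hk => if_pos (Finset.mem_filter.mp hk).2)]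
    simp
  have hSsum : ((pvDiv m).filter (fun k => k * k < m)).sum
      (fun k => if k * k = m then (1 : Int) else 2)
      = 2 * (((pvDiv m).filter (fun k => k * k < m)).card : Int) := by
    rw [Finset.sum_congr rfl (fun k hk => if_neg (by
      have := (Finset.mem_filter.mp hk).2; omega))]
    simp [mul_comm]
  have hcard : ((pvDiv m).filter (fun k => k * k ≤ m)).card
      + ((pvDiv m).filter (fun k => m < k * k)).card = (pvDiv m).card := by
    have h := Finset.card_filter_add_card_filter_not
      (s := pvDiv m) (p := fun k => k * k ≤ m)
    rwa [Finset.filter_congr (fun k _ => by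
      constructor <;> intro h' <;> omega : ∀ k ∈ pvDiv m, (¬ k * k ≤ m) ↔ m < k * k)] at h
  have hunion : ((pvDiv m).filter (fun k => k * k ≤ m)).card
      = ((pvDiv m).filter (fun k => k * k = m)).card
        + ((pvDiv m).filter (fun k => k * k < m)).card := by
    rw [hsplit, Finset.card_union_of_disjoint hdisj]
  rw [hD, hsplit, Finset.sum_union hdisj, hEsum, hSsum]
  have hLS := pvLargeSmall m hm
  have : (pvDiv m).card = ((pvDiv m).filter (fun k => k * k = m)).card
      + 2 * ((pvDiv m).filter (fun k => k * k < m)).card := by omega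
  rw [this]
  push_cast
  ring

theorem divcount_eq (m : Int) (hm : 1 ≤ m) : divcount m = ((pvDiv m).card : Int) := by
  rw [divcount, divcountGo_spec m 1 0 (le_refl 1), pairing m hm]
  ring

theorem loop_eq_all (plen : Nat) (l : List Int) :
    is_antiprime_loop plen l
      = l.all (fun i => decide ((proper_divisors i ++ [i]).length < plen)) := by
  induction l with
  | nil => rfl
  | cons i rest ih =>
    rw [is_antiprime_loop, List.all_cons, ih]
    by_cases h : (proper_divisors i ++ [i]).length ≥ plen
    · rw [if_pos h]
      have hd : decide ((proper_divisors i ++ [i]).length < plen) = false := by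
        simp only [decide_eq_false_iff_not]; omega
      rw [hd, Bool.false_and]
    · rw [if_neg h]
      have hd : decide ((proper_divisors i ++ [i]).length < plen) = true := by
        simp only [decide_eq_true_eq]; omega
      rw [hd, Bool.true_and]

-- ===== VERDICT (by name: the statement is the Claim_ definition above) =====
theorem is_antiprime_spec : Claim_equal_is_antiprime := by
  intro n _
  show is_antiprime n = is_antiprime_alt n
  by_cases h2 : 2 ≤ n
  · simp only [is_antiprime, is_antiprime_alt]
    rw [loop_eq_all]
    refine all_congr_mem _ _ _ (fun i hi => ?_)
    rw [PySem.List.mem_pyRange_one] at hi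
    have h1 := A_count i (by omega)
    have h2' := A_count n (by omega)
    have h3 := divcount_eq i (by omega)
    have h4 := divcount_eq n (by omega)
    rw [decide_eq_decide]
    simp only [List.length_append, List.length_cons, List.length_nil] at h1 h2' ⊢
    omega
  · simp only [is_antiprime, is_antiprime_alt,
      PySem.List.pyRange_one_eq_nil (by omega : n ≤ 1)]
    rfl
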